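-- pv_equiv track=rewrite | github.com/wangdingkang/DiscreteMorse | Code/Tools/SWC2Geojson/Projector.py | find_index_from_filename
-- ===== SOURCE A (Python) =====
-- def find_index_from_filename(filelist):
--     pieces = filelist[0].split('_')
--     len_piece = len(pieces)
--     ind_piece = 0
--     for i in range(len_piece):
--         if pieces[-(i+1)].isdigit():
--             ind_piece = -(i+1)
--             break
--     return ind_piece
-- ===== SOURCE B (Python) =====
-- def find_index_from_filename(filelist):
--     pieces = filelist[0].split('_')
--     last = None
--     for j, p in enumerate(pieces):
--         if p.isdigit():
--             last = j
--     return last - len(pieces) if last is not None else 0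
-- ===== Notes on version B (the rewrite author's own statement) =====
-- stated objective: alternative
-- what changed: Replaces the backward early-break index loop over pieces[-(i+1)] with a single forward enumerate pass keeping the last digit index, converting it to a negative index only at the end.
import Mathlib
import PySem

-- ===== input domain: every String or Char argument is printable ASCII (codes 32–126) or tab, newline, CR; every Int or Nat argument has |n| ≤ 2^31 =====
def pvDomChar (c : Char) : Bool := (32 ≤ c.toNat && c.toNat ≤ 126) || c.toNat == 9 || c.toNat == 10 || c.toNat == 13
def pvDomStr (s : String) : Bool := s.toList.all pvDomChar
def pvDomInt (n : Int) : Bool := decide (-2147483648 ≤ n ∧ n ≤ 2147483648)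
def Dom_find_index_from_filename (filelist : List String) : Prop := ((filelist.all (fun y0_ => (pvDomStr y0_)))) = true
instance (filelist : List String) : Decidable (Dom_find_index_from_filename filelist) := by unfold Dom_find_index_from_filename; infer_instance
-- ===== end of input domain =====

-- B replaces A's backward early-break scan by a forward enumerate pass keeping the last digit index (alternative decomposition, same cost).

-- ===== PORT A =====
-- A's 'for i in range(len_piece): if pieces[-(i+1)].isdigit(): ind_piece = -(i+1); break'
def fifLoop (pieces : List String) : List Nat → Int
  | [] => 0
  | i :: rest =>
      if PySem.Str.strIsdigit ((PySem.List.pyGet? pieces (-((i : Int) + 1))).getD "") then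
        -((i : Int) + 1)
      else fifLoop pieces rest

def find_index_from_filename (filelist : List String) : Int :=
  let pieces := (PySem.Str.split? ((PySem.List.pyGet? filelist 0).getD "") "_").getD []
  fifLoop pieces (List.range pieces.length)

-- ===== PORT B =====
-- B's 'for j, p in enumerate(pieces): if p.isdigit(): last = j'
def fifAltLoop : List (Int × String) → Option Int → Option Int
  | [], last => last
  | (j, p) :: rest, last => fifAltLoop rest (if PySem.Str.strIsdigit p then some j else last)

def find_index_from_filename_alt (filelist : List String) : Int :=
  let pieces := (PySem.Str.split? ((PySem.List.pyGet? filelist 0).getD "") "_").getD []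
  match fifAltLoop (PySem.List.enumerate pieces) none with
  | some j => j - (pieces.length : Int)
  | none => 0

-- ===== PRECONDITION & SPEC =====
-- Pre_ excludes only the empty list, where A raises IndexError on filelist[0].
def Pre_find_index_from_filename (filelist : List String) : Prop := filelist ≠ []
instance (filelist : List String) : Decidable (Pre_find_index_from_filename filelist) := by
  unfold Pre_find_index_from_filename; infer_instance

def pvWitness_find_index_from_filename : List String := ["slice_12_x.swc"]

def Spec_find_index_from_filename (filelist : List String) (out : Int) : Prop := out = find_index_from_filename_alt filelist
instance (filelist : List String) (out : Int) : Decidable (Spec_find_index_from_filename filelist out) := by unfold Spec_find_index_from_filename; infer_instance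

-- ===== CLAIM (what is proved, stated in full; the proofs are below) =====
def Claim_equal_find_index_from_filename : Prop := ∀ (filelist : List String), Dom_find_index_from_filename filelist → Pre_find_index_from_filename filelist → Spec_find_index_from_filename filelist (find_index_from_filename filelist)

-- ===== LEMMAS AND PROOFS =====

-- A's loop over indices k, k+1, …, len-1 is a first-match scan of pieces.reverse from position k.
theorem fifLoop_eq_findIdx (pieces : List String) :
    ∀ (m k : Nat), k + m = pieces.length →
      fifLoop pieces (List.range' k m) =
        match (pieces.reverse.drop k).findIdx? (fun p => PySem.Str.strIsdigit p) with
        | some i => -((k : Int) + i + 1)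
        | none => 0 := by
  intro m
  induction m with
  | zero =>
      intro k hk
      have hnil : pieces.reverse.drop k = [] := by
        apply List.drop_eq_nil_of_le; simp; omega
      rw [hnil]
      simp [fifLoop]
  | succ m ih =>
      intro k hk
      have hklt : k < pieces.length := by omega
      have hklt' : k < pieces.reverse.length := by simpa using hklt
      have hget : PySem.List.pyGet? pieces (-((k : Int) + 1)) = some pieces[pieces.length - (k + 1)] := by
        have h1 : (0 : Nat) < k + 1 := by omega
        have h2 : k + 1 ≤ pieces.length := by omega
        have := PySem.List.pyGet?_neg_natCast (xs := pieces) (k := k + 1) h1 h2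
        rw [show (-((k : Int) + 1)) = -(((k + 1 : Nat) : Int)) by push_cast; ring, this,
          List.getElem?_eq_getElem (by omega)]
      have hrev : pieces.reverse[k]'hklt' = pieces[pieces.length - (k + 1)] := by
        rw [List.getElem_reverse]
        congr 1
        omega
      have hdrop : pieces.reverse.drop k = pieces.reverse[k]'hklt' :: pieces.reverse.drop (k + 1) :=
        List.drop_eq_getElem_cons hklt'
      rw [List.range'_succ]
      show fifLoop pieces (k :: List.range' (k + 1) m) = _
      rw [fifLoop, hget, hdrop, List.findIdx?_cons]
      simp only [Option.getD_some, hrev]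
      by_cases hd : PySem.Str.strIsdigit pieces[pieces.length - (k + 1)] = true
      · rw [if_pos hd, if_pos hd]
        push_cast
        ring
      · rw [if_neg hd, if_neg hd, ih (k + 1) (by omega)]
        cases hfi : (pieces.reverse.drop (k + 1)).findIdx? (fun p => PySem.Str.strIsdigit p) with
        | none => rfl
        | some i =>
            simp only [Option.map_some]
            push_cast
            ring

-- B's loop returns the last matching index: the first match of the reversed enumeration.
theorem fifAltLoop_eq_find? :
    ∀ (l : List (Int × String)) (acc : Option Int),
      fifAltLoop l acc =
        match l.reverse.find? (fun x => PySem.Str.strIsdigit x.2) with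
        | some x => some x.1
        | none => acc := by
  intro l
  induction l with
  | nil => intro acc; simp [fifAltLoop]
  | cons x rest ih =>
      intro acc
      obtain ⟨j, p⟩ := x
      rw [fifAltLoop, ih, List.reverse_cons, List.find?_append]
      cases hf : rest.reverse.find? (fun x => PySem.Str.strIsdigit x.2) with
      | some y => rfl
      | none =>
          simp only [Option.none_or]
          by_cases hd : PySem.Str.strIsdigit p = true
          · rw [if_pos hd, List.find?_cons_of_pos (by simpa using hd)]
          · rw [if_neg hd, List.find?_cons_of_neg (by simpa using hd), List.find?_nil]

-- The first digit entry (from the back) of the enumeration carries index len - 1 - i,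
-- where i is the first digit position in the reversed pieces.
theorem enum_reverse_find? (pieces : List String) :
    ((PySem.List.enumerate pieces).reverse.find? (fun x => PySem.Str.strIsdigit x.2)).map Prod.fst
      = (match pieces.reverse.findIdx? (fun p => PySem.Str.strIsdigit p) with
         | some i => some ((pieces.length : Int) - 1 - (i : Int))
         | none => none) := by
  induction pieces using List.reverseRecOn with
  | nil => simp [PySem.List.enumerate]
  | append_singleton xs x ih =>
      rw [PySem.List.enumerate_append]
      have he : PySem.List.enumerate [x] ((0 : Int) + (xs.length : Int)) = [((xs.length : Int), x)] := by
        simp [PySem.List.enumerate]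
      rw [he, List.reverse_append, List.reverse_singleton, List.singleton_append,
        List.reverse_append, List.reverse_singleton, List.singleton_append,
        List.findIdx?_cons]
      by_cases hd : PySem.Str.strIsdigit x = true
      · rw [List.find?_cons_of_pos (by simpa using hd), if_pos (by simpa using hd)]
        simp only [Option.map_some]
        congr 1
        simp only [List.length_append, List.length_cons, List.length_nil]
        push_cast
        ring
      · rw [List.find?_cons_of_neg (by simpa using hd), if_neg (by simpa using hd), ih]
        cases hfi : xs.reverse.findIdx? (fun p => PySem.Str.strIsdigit p) with
        | none => simp
        | some i =>
            simp only [Option.map_some, Option.some.injEq, List.length_append,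
              List.length_cons, List.length_nil]
            push_cast
            ring

theorem main_lemma (pieces : List String) :
    fifLoop pieces (List.range pieces.length) =
      match fifAltLoop (PySem.List.enumerate pieces) none with
      | some j => j - (pieces.length : Int)
      | none => 0 := by
  rw [List.range_eq_range', fifLoop_eq_findIdx pieces pieces.length 0 (by omega),
    fifAltLoop_eq_find?]
  have h2 := enum_reverse_find? pieces
  rw [List.drop_zero]
  cases hf : (PySem.List.enumerate pieces).reverse.find? (fun x => PySem.Str.strIsdigit x.2) with
  | some y =>
      cases hfi : pieces.reverse.findIdx? (fun p => PySem.Str.strIsdigit p) with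
      | none => rw [hf, hfi] at h2; simp at h2
      | some i =>
          rw [hf, hfi] at h2
          simp only [Option.map_some, Option.some.injEq] at h2
          simp only [h2]
          push_cast
          ring
  | none =>
      cases hfi : pieces.reverse.findIdx? (fun p => PySem.Str.strIsdigit p) with
      | none => rfl
      | some i => rw [hf, hfi] at h2; simp at h2

-- ===== VERDICT (by name: the statement is the Claim_ definition above) =====
theorem find_index_from_filename_spec : Claim_equal_find_index_from_filename := by
  intro filelist _ _
  unfold Spec_find_index_from_filename find_index_from_filename find_index_from_filename_alt
  exact main_lemma _
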